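-- pv_equiv track=rewrite | github.com/emilyrobinson88/cse5473project | pass_app/app/assets/python/PasswordAnalysis.py | RepeatingCharacters
-- ===== SOURCE A (Python) =====
-- def RepeatingCharacters(password):
--     repeatingList = []
--     currentStreak = 1
--     for i in range(1, len(password)):
--         if password[i - 1] == password[i]:
--             currentStreak += 1
--         else:
--             if(1 < currentStreak):
--                 repeatingList.append(currentStreak)
--             currentStreak = 1
--     if(1 < currentStreak):
--         repeatingList.append(currentStreak)
--     return sum(repeatingList)
-- ===== SOURCE B (Python) =====
-- def RepeatingCharacters(password):
--     total = 0
--     i = 0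
--     n = len(password)
--     while i < n:
--         j = i
--         while j < n and password[j] == password[i]:
--             j += 1
--         if j - i > 1:
--             total += j - i
--         i = j
--     return total
-- ===== Notes on version B (the rewrite author's own statement) =====
-- stated objective: alternative
-- what changed: Replaced A's incremental streak counter with a duplicated end-of-loop flush by a two-pointer scan that jumps over each maximal run at once and adds its length when it exceeds 1.
import Mathlib
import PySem

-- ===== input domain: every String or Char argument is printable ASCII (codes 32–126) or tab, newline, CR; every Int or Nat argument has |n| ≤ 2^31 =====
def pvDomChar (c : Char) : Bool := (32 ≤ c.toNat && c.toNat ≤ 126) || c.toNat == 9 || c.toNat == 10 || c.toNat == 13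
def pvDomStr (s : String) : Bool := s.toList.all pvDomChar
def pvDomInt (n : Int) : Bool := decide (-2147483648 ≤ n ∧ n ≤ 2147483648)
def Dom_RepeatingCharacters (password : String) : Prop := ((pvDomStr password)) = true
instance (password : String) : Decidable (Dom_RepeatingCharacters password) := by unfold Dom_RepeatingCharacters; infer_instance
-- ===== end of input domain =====

-- B is an alternative, not measured faster: a two-pointer run scan instead of A's streak counter with a duplicated flush.

-- ===== PORT A =====
def RepeatingCharacters (password : String) : Int :=
  let cs := password.toList
  let st := (PySem.List.pyRange 1 (cs.length : Int) 1).foldl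
    (fun (st : List Int × Int) i =>
      if PySem.List.pyGet? cs (i - 1) == PySem.List.pyGet? cs i then
        (st.1, st.2 + 1)
      else
        (if 1 < st.2 then st.1 ++ [st.2] else st.1, 1))
    ([], 1)
  (if 1 < st.2 then st.1 ++ [st.2] else st.1).sum

-- ===== PORT B =====
-- inner while loop of Source B: count the leading chars equal to c, return the remainder
def runSplit (c : Char) : List Char → Nat × List Char
  | [] => (0, [])
  | d :: rest =>
      if d == c then
        let p := runSplit c rest
        (p.1 + 1, p.2)
      else (0, d :: rest)

theorem runSplit_len_le (c : Char) (l : List Char) : (runSplit c l).2.length ≤ l.length := by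
  induction l with
  | nil => simp [runSplit]
  | cons d rest ih =>
      simp only [runSplit]
      split
      · exact Nat.le_succ_of_le ih
      · simp

-- outer while loop of Source B, as the structural recursion over the remaining suffix
def altLoop : List Char → Int
  | [] => 0
  | c :: rest =>
      let p := runSplit c rest
      let n : Int := (p.1 : Int) + 1
      (if 1 < n then n else 0) + altLoop p.2
termination_by l => l.length
decreasing_by
  have := runSplit_len_le c rest
  simp only [List.length_cons]
  omega

def RepeatingCharacters_alt (password : String) : Int :=
  altLoop password.toList

-- ===== PRECONDITION & SPEC =====
def Spec_RepeatingCharacters (password : String) (out : Int) : Prop := out = RepeatingCharacters_alt password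
instance (password : String) (out : Int) : Decidable (Spec_RepeatingCharacters password out) := by unfold Spec_RepeatingCharacters; infer_instance

-- ===== CLAIM (what is proved, stated in full; the proofs are below) =====
def Claim_equal_RepeatingCharacters : Prop := ∀ (password : String), Dom_RepeatingCharacters password → Spec_RepeatingCharacters password (RepeatingCharacters password)

-- ===== LEMMAS AND PROOFS =====

theorem altLoop_nil : altLoop [] = 0 := by rw [altLoop.eq_def]

theorem altLoop_cons (c : Char) (rest : List Char) :
    altLoop (c :: rest)
    = (if 1 < ((runSplit c rest).1 : Int) + 1 then ((runSplit c rest).1 : Int) + 1 else 0)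
      + altLoop (runSplit c rest).2 := by
  rw [altLoop.eq_def]

-- the loop body of A, seen as a fold over adjacent pairs of characters
def stepF (st : List Int × Int) (p : Char × Char) : List Int × Int :=
  if p.1 == p.2 then (st.1, st.2 + 1)
  else (if 1 < st.2 then st.1 ++ [st.2] else st.1, 1)

def flushSum (st : List Int × Int) : Int :=
  (if 1 < st.2 then st.1 ++ [st.2] else st.1).sum

-- A's index fold over range(1, len) equals a fold over the adjacent pairs
theorem idx_eq_pairs (cs : List Char) :
    ∀ (n k : Nat) (st : List Int × Int), cs.length - k ≤ n →
    (PySem.List.pyRange ((k : Int) + 1) (cs.length : Int) 1).foldl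
      (fun (st : List Int × Int) i =>
        if PySem.List.pyGet? cs (i - 1) == PySem.List.pyGet? cs i then
          (st.1, st.2 + 1)
        else
          (if 1 < st.2 then st.1 ++ [st.2] else st.1, 1)) st
    = ((cs.drop k).zip (cs.drop (k + 1))).foldl stepF st := by
  intro n
  induction n with
  | zero =>
      intro k st h
      have hk : cs.length ≤ k := by omega
      rw [PySem.List.pyRange_one_eq_nil (by exact_mod_cast Nat.le_succ_of_le hk)]
      rw [List.drop_eq_nil_of_le hk]
      rfl
  | succ n ih =>
      intro k st h
      by_cases hk : cs.length ≤ k + 1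
      · rw [PySem.List.pyRange_one_eq_nil (by exact_mod_cast hk)]
        rw [List.drop_eq_nil_of_le hk, List.zip_nil_right]
        rfl
      · have hk1 : k < cs.length := by omega
        have hk2 : k + 1 < cs.length := by omega
        rw [PySem.List.pyRange_one_cons (by exact_mod_cast hk2)]
        rw [List.foldl_cons]
        have e2 : ((k : Int) + 1 + 1) = ((k + 1 : Nat) : Int) + 1 := by push_cast; ring
        rw [e2, ih (k + 1) _ (by omega)]
        have d1 : cs.drop k = cs[k] :: cs.drop (k + 1) := (List.getElem_cons_drop hk1).symm
        have d2 : cs.drop (k + 1) = cs[k + 1] :: cs.drop (k + 2) := (List.getElem_cons_drop hk2).symm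
        conv_rhs => rw [d1, d2, List.zip_cons_cons, List.foldl_cons]
        rw [d2]
        congr 1
        have g1 : PySem.List.pyGet? cs ((k : Int) + 1 - 1) = some cs[k] := by
          rw [show ((k : Int) + 1 - 1) = (k : Int) from by ring,
              PySem.List.pyGet?_natCast, List.getElem?_eq_getElem hk1]
        have g2 : PySem.List.pyGet? cs ((k : Int) + 1) = some cs[k + 1] := by
          rw [show ((k : Int) + 1) = ((k + 1 : Nat) : Int) from by push_cast; ring,
              PySem.List.pyGet?_natCast, List.getElem?_eq_getElem hk2]
        simp only [g1, g2, stepF]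
        rfl

-- A's fold over range(1, len) with the leading index-1 spelt as ↑0 + 1
theorem idx_eq_pairs0 (cs : List Char) (st : List Int × Int) :
    (PySem.List.pyRange 1 (cs.length : Int) 1).foldl
      (fun (st : List Int × Int) i =>
        if PySem.List.pyGet? cs (i - 1) == PySem.List.pyGet? cs i then
          (st.1, st.2 + 1)
        else
          (if 1 < st.2 then st.1 ++ [st.2] else st.1, 1)) st
    = (cs.zip (cs.drop 1)).foldl stepF st := by
  have h := idx_eq_pairs cs cs.length 0 st (by omega)
  simpa using h

-- the pair fold flushed and summed equals B's run-by-run recursion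
theorem pairs_spec :
    ∀ (rest : List Char) (prev : Char) (lst : List Int) (cur : Int),
    flushSum (((prev :: rest).zip rest).foldl stepF (lst, cur))
    = lst.sum
      + (if 1 < cur + ((runSplit prev rest).1 : Int) then cur + ((runSplit prev rest).1 : Int) else 0)
      + altLoop (runSplit prev rest).2 := by
  intro rest
  induction rest with
  | nil =>
      intro prev lst cur
      simp only [runSplit, List.zip_nil_right, List.foldl_nil, flushSum, altLoop_nil,
        Nat.cast_zero, add_zero]
      split <;> simp
  | cons d rest' ih =>
      intro prev lst cur
      rw [List.zip_cons_cons, List.foldl_cons]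
      by_cases hpd : prev = d
      · subst hpd
        have hs : stepF (lst, cur) (prev, prev) = (lst, cur + 1) := by
          simp [stepF]
        rw [hs, ih prev lst (cur + 1)]
        simp only [runSplit, beq_self_eq_true, if_true]
        push_cast
        ring_nf
      · have hs : stepF (lst, cur) (prev, d) =
            (if 1 < cur then lst ++ [cur] else lst, 1) := by
          simp [stepF, hpd]
        rw [hs, ih d _ 1]
        have hr : runSplit prev (d :: rest') = (0, d :: rest') := by
          simp [runSplit, Ne.symm hpd]
        rw [hr, altLoop_cons]
        have hflush : (if 1 < cur then lst ++ [cur] else lst).sum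
            = lst.sum + (if 1 < cur then cur else 0) := by
          split <;> simp
        rw [hflush, show (1 : Int) + ((runSplit d rest').1 : Int)
              = ((runSplit d rest').1 : Int) + 1 from by ring]
        ring

-- ===== VERDICT (by name: the statement is the Claim_ definition above) =====
theorem RepeatingCharacters_spec : Claim_equal_RepeatingCharacters := by
  intro password _
  unfold Spec_RepeatingCharacters RepeatingCharacters RepeatingCharacters_alt
  cases h : password.toList with
  | nil =>
      dsimp only
      rw [show ((([] : List Char).length : Int)) = 0 from by simp,
          PySem.List.pyRange_one_eq_nil (by norm_num), altLoop_nil]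
      norm_num
  | cons c rest =>
      dsimp only
      have hf : ∀ st : List Int × Int,
          (if 1 < st.2 then st.1 ++ [st.2] else st.1).sum = flushSum st := fun _ => rfl
      rw [hf]
      rw [idx_eq_pairs0 (c :: rest) ([], 1)]
      simp only [List.drop_one, List.tail_cons]
      rw [pairs_spec rest c [] 1, altLoop_cons]
      simp only [List.sum_nil, zero_add]
      rw [show (1 : Int) + ((runSplit c rest).1 : Int)
            = ((runSplit c rest).1 : Int) + 1 from by ring]
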